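-- pv_equiv track=rewrite | github.com/Agentic-Environmental-Engineering/GymVerse | gem/gem/envs/RLVE/grid_parity_construction_env.py | _compute_parity
-- ===== SOURCE A (Python) =====
-- from typing import Any, Optional, SupportsFloat, Tuple, List
--
-- def _compute_parity(grid: List[str]) -> List[List[int]]:
--     """Compute the parity matrix for the given grid."""
--     N = len(grid)
--     M = len(grid[0]) if N > 0 else 0
--     parity = [[0] * M for _ in range(N)]
--     for i in range(N):
--         for j in range(M):
--             parity[i][j] ^= int(grid[i][j])
--             for di, dj in [(-1, 0), (+1, 0), (0, -1), (0, +1)]: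
--                 ni, nj = i + di, j + dj
--                 if 0 <= ni < N and 0 <= nj < M:
--                     parity[i][j] ^= int(grid[ni][nj])
--     return parity
-- ===== SOURCE B (Python) =====
-- def _compute_parity(grid):
--     N = len(grid)
--     M = len(grid[0]) if N > 0 else 0
--     V = [[int(c) for c in row[:M]] for row in grid]
--     Z = [0] * M
--     P = [Z] + V + [Z]
--     out = []
--     for i in range(N):
--         r = V[i]
--         horiz = [a ^ b ^ c for a, b, c in zip([0] + r[:-1], r, r[1:] + [0])]
--         out.append([h ^ u ^ d for h, u, d in zip(horiz, P[i], P[i + 2])])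
--     return out
-- ===== Notes on version B (the rewrite author's own statement) =====
-- stated objective: alternative
-- what changed: A gathers each output cell by re-indexing and re-parsing up to 5 neighbouring characters with per-neighbour bounds checks; B converts the grid to an int matrix once (each character parsed exactly once) and builds each output row by XOR-zipping the row with its left/right shifts and the padded rows above and below, with no per-cell bounds checks.
import Mathlib
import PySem

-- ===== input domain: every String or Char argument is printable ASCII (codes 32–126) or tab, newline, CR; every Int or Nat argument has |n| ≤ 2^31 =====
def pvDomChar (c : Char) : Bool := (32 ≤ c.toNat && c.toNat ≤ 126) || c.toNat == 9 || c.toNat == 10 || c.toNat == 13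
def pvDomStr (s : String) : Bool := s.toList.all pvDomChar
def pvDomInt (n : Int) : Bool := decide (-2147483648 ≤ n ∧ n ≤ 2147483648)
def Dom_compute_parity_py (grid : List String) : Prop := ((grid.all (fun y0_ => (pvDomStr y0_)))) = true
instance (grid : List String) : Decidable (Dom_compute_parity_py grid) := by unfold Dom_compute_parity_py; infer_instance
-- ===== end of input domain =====

-- B replaces the per-cell neighbour gather (5 bounds-checked indexings and up to 5 int() parses
-- per cell) by one int-conversion pass followed by whole-row shifted XOR zips (alternative decomposition).

-- ===== PORT A =====
-- literal port of A; int(grid[i][j]) is ported with pyGetD defaults at the IndexError/ValueError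
-- points (short row / non-digit char), which Pre_ excludes exactly.
def compute_parity_py (grid : List String) : List (List Int) :=
  let N : Int := (grid.length : Int)
  let M : Int := if 0 < N then (((PySem.List.pyGetD grid 0 "").toList.length : Int)) else 0
  let parity : List (List Int) :=
    (PySem.List.pyRange 0 N).map (fun _ => (PySem.List.pyRange 0 M).map (fun _ => (0 : Int)))
  (PySem.List.pyRange 0 N).foldl (fun parity i =>
    (PySem.List.pyRange 0 M).foldl (fun parity j =>
      parity.modify i.toNat (fun row => row.modify j.toNat (fun x =>
        let x := PySem.Int.bxor x
          ((PySem.Int.ofChars? [PySem.List.pyGetD (PySem.List.pyGetD grid i "").toList j ' ']).getD 0)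
        [((-1 : Int), (0 : Int)), (1, 0), (0, -1), (0, 1)].foldl (fun x d =>
          let ni := i + d.1
          let nj := j + d.2
          if 0 ≤ ni ∧ ni < N ∧ 0 ≤ nj ∧ nj < M then
            PySem.Int.bxor x
              ((PySem.Int.ofChars? [PySem.List.pyGetD (PySem.List.pyGetD grid ni "").toList nj ' ']).getD 0)
          else x) x))) parity) parity

-- ===== PORT B =====
-- literal port of Source B; row[:M] is .toList.take M (M ≥ 0); the three-way zip comprehensions are
-- ported as two nested zipWiths, same pairing order and truncation as Python's zip.
def compute_parity_py_alt (grid : List String) : List (List Int) :=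
  let N : Nat := grid.length
  let M : Nat := if 0 < N then (grid.headD "").toList.length else 0
  let V : List (List Int) :=
    grid.map (fun (row : String) => (row.toList.take M).map (fun c => (PySem.Int.ofChars? [c]).getD 0))
  let Z : List Int := List.replicate M 0
  let P : List (List Int) := [Z] ++ V ++ [Z]
  (List.range N).map (fun i =>
    let r := V.getD i []
    let horiz := List.zipWith (fun ab c => PySem.Int.bxor ab c)
      (List.zipWith (fun a b => PySem.Int.bxor a b) ((0 : Int) :: r.dropLast) r)
      (r.tail ++ [0])
    List.zipWith (fun hu d => PySem.Int.bxor hu d)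
      (List.zipWith (fun h u => PySem.Int.bxor h u) horiz (P.getD i []))
      (P.getD (i + 2) []))

-- ===== PRECONDITION & SPEC =====
-- width of the first row (0 for the empty grid); helper for Pre_
def pvM (grid : List String) : Nat := (grid.headD "").toList.length

-- Pre_ excludes exactly the inputs on which the Python A raises: a row shorter than the first row
-- (IndexError) or a non-digit character among the first M characters of a row (ValueError).
def Pre_compute_parity_py (grid : List String) : Prop :=
  ∀ row ∈ grid, pvM grid ≤ row.toList.length ∧
    ((row.toList.take (pvM grid)).all (fun c => PySem.Chars.isdigit c)) = true
instance (grid : List String) : Decidable (Pre_compute_parity_py grid) := by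
  unfold Pre_compute_parity_py; infer_instance

def pvWitness_compute_parity_py : List String := ["12", "34"]

def Spec_compute_parity_py (grid : List String) (out : List (List Int)) : Prop := out = compute_parity_py_alt grid
instance (grid : List String) (out : List (List Int)) : Decidable (Spec_compute_parity_py grid out) := by unfold Spec_compute_parity_py; infer_instance

-- ===== CLAIM (what is proved, stated in full; the proofs are below) =====
def Claim_equal_compute_parity_py : Prop := ∀ (grid : List String), Dom_compute_parity_py grid → Pre_compute_parity_py grid → Spec_compute_parity_py grid (compute_parity_py grid)

-- ===== LEMMAS AND PROOFS =====

lemma pv_bxor_assoc (a b c : Int) :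
    PySem.Int.bxor (PySem.Int.bxor a b) c = PySem.Int.bxor a (PySem.Int.bxor b c) := by
  unfold PySem.Int.bxor
  by_cases ha : 0 ≤ a <;> by_cases hb : 0 ≤ b <;> by_cases hc : 0 ≤ c <;>
    simp only [ha, hb, hc, if_true, if_false] <;>
    split_ifs <;>
    simp_all only [Int.toNat_natCast, not_true_eq_false, not_false_eq_true,
      show ∀ n:Nat, (0:Int) ≤ ↑n from fun n => by omega,
      show ∀ n:Nat, ¬ ((0:Int) ≤ -↑n - 1) from fun n => by omega,
      show ∀ n:Nat, -(-(↑n:Int) - 1) - 1 = ↑n from fun n => by omega] <;>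
    rw [Nat.xor_assoc]

-- the value int(grid[i][j]) (Nat indices, defaulted out of range; Pre_ keeps us in range on digits)
def pvVal (grid : List String) (i j : Nat) : Int :=
  (PySem.Int.ofChars? [(grid.getD i "").toList.getD j ' ']).getD 0

lemma pv_foldl_modify {α : Type} (F : Nat → α → α) (n : Nat) (l : List α) :
    (List.range n).foldl (fun r j => r.modify j (F j)) l
      = l.mapIdx (fun j x => if j < n then F j x else x) := by
  induction n with
  | zero =>
    simp only [List.range_zero, List.foldl_nil, Nat.not_lt_zero, if_false]
    exact (List.ext_getElem (by simp) (by intro k h1 h2; simp)).symm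
  | succ n ih =>
    rw [List.range_succ, List.foldl_append, ih]
    simp only [List.foldl_cons, List.foldl_nil]
    apply List.ext_getElem
    · simp
    intro k hk1 hk2
    simp only [List.getElem_modify, List.getElem_mapIdx]
    by_cases h : n = k <;> by_cases h2 : k < n <;> simp [h, h2] <;> omega

-- A's per-cell value: the body of A's double loop at cell (i, j) (Nat indices)
def pvAcell (grid : List String) (i j : Nat) : Int :=
  [((-1 : Int), (0 : Int)), (1, 0), (0, -1), (0, 1)].foldl (fun x d =>
      if 0 ≤ (i : Int) + d.1 ∧ (i : Int) + d.1 < (grid.length : Int) ∧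
          0 ≤ (j : Int) + d.2 ∧ (j : Int) + d.2 < (pvM grid : Int) then
        PySem.Int.bxor x
          ((PySem.Int.ofChars? [PySem.List.pyGetD (PySem.List.pyGetD grid ((i : Int) + d.1) "").toList ((j : Int) + d.2) ' ']).getD 0)
      else x)
    (PySem.Int.bxor 0
      ((PySem.Int.ofChars? [PySem.List.pyGetD (PySem.List.pyGetD grid (i : Int) "").toList (j : Int) ' ']).getD 0))

-- B's per-cell value
def pvBcell (grid : List String) (i j : Nat) : Int :=
  PySem.Int.bxor
    (PySem.Int.bxor
      (PySem.Int.bxor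
        (PySem.Int.bxor (if j = 0 then 0 else pvVal grid i (j - 1)) (pvVal grid i j))
        (if j + 1 < pvM grid then pvVal grid i (j + 1) else 0))
      (if i = 0 then 0 else pvVal grid (i - 1) j))
    (if i + 1 < grid.length then pvVal grid (i + 1) j else 0)

lemma pv_zero_bxor (a : Int) : PySem.Int.bxor 0 a = a := by
  rw [PySem.Int.bxor_comm, PySem.Int.bxor_zero]

lemma pv_bxor_left_comm (a b c : Int) :
    PySem.Int.bxor a (PySem.Int.bxor b c) = PySem.Int.bxor b (PySem.Int.bxor a c) := by
  rw [← pv_bxor_assoc, PySem.Int.bxor_comm a b, pv_bxor_assoc]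

lemma pv_cell_int (grid : List String) (i j : Int) (hi : 0 ≤ i) (hj : 0 ≤ j) :
    (PySem.Int.ofChars? [PySem.List.pyGetD (PySem.List.pyGetD grid i "").toList j ' ']).getD 0
      = pvVal grid i.toNat j.toNat := by
  lift i to Nat using hi
  lift j to Nat using hj
  simp [pvVal, PySem.List.pyGetD_natCast]

lemma pv_modify_id {α : Type} (i : Nat) (l : List α) : l.modify i (fun x => x) = l := by
  apply List.ext_getElem
  · simp
  · intro k h1 h2; simp [List.getElem_modify]

lemma pv_foldl_modify_same {α : Type} (i : Nat) (G : Nat → α → α) (js : List Nat) (l : List α) :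
    js.foldl (fun p j => p.modify i (G j)) l
      = l.modify i (fun x => js.foldl (fun x j => G j x) x) := by
  induction js generalizing l with
  | nil => simp [pv_modify_id]
  | cons j js ih =>
    simp only [List.foldl_cons, ih, List.modify_modify_eq]
    rfl

lemma pv_A_norm (grid : List String) :
    compute_parity_py grid
      = (List.range grid.length).map (fun i => (List.range (pvM grid)).map (fun j => pvAcell grid i j)) := by
  cases grid with
  | nil => rfl
  | cons g gs =>
    simp only [compute_parity_py]
    rw [if_pos (by exact_mod_cast Nat.succ_pos gs.length)]
    simp only [PySem.List.pyGetD_zero, List.getD_cons_zero,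
      PySem.List.pyRange_zero_natCast, List.foldl_map, Int.toNat_natCast]
    simp only [pv_foldl_modify_same, pv_foldl_modify]
    apply List.ext_getElem
    · simp
    intro i hi1 hi2
    simp only [List.length_mapIdx, List.length_map, List.length_range] at hi1 hi2
    apply List.ext_getElem
    · simp [List.getElem_mapIdx, Nat.lt_succ_iff.mp hi1, pvM]
    intro j hj1 hj2
    simp only [List.getElem_mapIdx, List.getElem_map, List.getElem_range]
    have hj : j < g.toList.length := by
      simpa [pvM] using hj2
    simp only [hi1, if_true, List.getElem_mapIdx, List.getElem_map,
      hj, pvAcell, pvM, List.headD_cons]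
    rfl

lemma pv_B_norm (grid : List String) (hpre : Pre_compute_parity_py grid) :
    compute_parity_py_alt grid
      = (List.range grid.length).map (fun i => (List.range (pvM grid)).map (fun j => pvBcell grid i j)) := by
  simp only [compute_parity_py_alt]
  apply List.ext_getElem
  · simp
  intro i hi1 hi2
  simp only [List.length_map, List.length_range] at hi1 hi2
  have hi : i < grid.length := hi2
  have hM0 : (if 0 < grid.length then (grid.headD "").toList.length else 0) = pvM grid := by
    rw [if_pos (by omega)]; rfl
  simp only [List.getElem_map, List.getElem_range, hM0]
  have hrlen : ∀ k, k < grid.length →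
      ((grid.map (fun (row : String) => (row.toList.take (pvM grid)).map
          (fun c => (PySem.Int.ofChars? [c]).getD 0))).getD k []).length = pvM grid := by
    intro k hk
    rw [List.getD_eq_getElem _ _ (by simpa using hk), List.getElem_map]
    have := (hpre grid[k] (List.getElem_mem hk)).1
    simp only [List.length_map, List.length_take]
    omega
  have hr? : ∀ k l, k < grid.length → l < pvM grid →
      ((grid.map (fun (row : String) => (row.toList.take (pvM grid)).map
          (fun c => (PySem.Int.ofChars? [c]).getD 0))).getD k [])[l]? = some (pvVal grid k l) := by
    intro k l hk hl
    have hle := (hpre grid[k] (List.getElem_mem hk)).1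
    rw [List.getD_eq_getElem _ _ (by simpa using hk), List.getElem_map]
    rw [List.getElem?_eq_getElem (by simp only [List.length_map, List.length_take]; omega)]
    simp only [List.getElem_map, List.getElem_take]
    unfold pvVal
    rw [List.getD_eq_getElem grid _ hk, List.getD_eq_getElem _ _ (by omega)]
  apply List.ext_getElem?
  intro j
  by_cases hj : j < pvM grid
  · have hrl := hrlen i hi
    have hA : (((0:Int) :: ((grid.map (fun (row : String) => (row.toList.take (pvM grid)).map
          (fun c => (PySem.Int.ofChars? [c]).getD 0))).getD i []).dropLast))[j]?
        = some (if j = 0 then 0 else pvVal grid i (j - 1)) := by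
      by_cases hj0 : j = 0
      · subst hj0; simp
      · rw [List.getElem?_cons, if_neg hj0, List.getElem?_dropLast,
          if_pos (by rw [hrl]; omega), hr? i (j - 1) hi (by omega), if_neg hj0]
    have hB := hr? i j hi hj
    have hC : ((((grid.map (fun (row : String) => (row.toList.take (pvM grid)).map
          (fun c => (PySem.Int.ofChars? [c]).getD 0))).getD i []).tail) ++ [(0:Int)])[j]?
        = some (if j + 1 < pvM grid then pvVal grid i (j + 1) else 0) := by
      by_cases hjM : j + 1 < pvM grid
      · rw [List.getElem?_append, if_pos (by simp only [List.length_tail, hrl]; omega),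
          List.getElem?_tail, hr? i (j + 1) hi hjM, if_pos hjM]
      · rw [List.getElem?_append, if_neg (by simp only [List.length_tail, hrl]; omega),
          if_neg hjM, show j - (((grid.map (fun (row : String) => (row.toList.take (pvM grid)).map
            (fun c => (PySem.Int.ofChars? [c]).getD 0))).getD i []).tail).length = 0 from by
              simp only [List.length_tail, hrl]; omega]
        rfl
    have hU : ((([List.replicate (pvM grid) (0:Int)] ++ (grid.map (fun (row : String) =>
          (row.toList.take (pvM grid)).map (fun c => (PySem.Int.ofChars? [c]).getD 0)))
          ++ [List.replicate (pvM grid) 0]).getD i [])[j]?)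
        = some (if i = 0 then 0 else pvVal grid (i - 1) j) := by
      by_cases hi0 : i = 0
      · subst hi0
        simp [hj]
      · obtain ⟨ii, rfl⟩ : ∃ ii, i = ii + 1 := ⟨i - 1, by omega⟩
        rw [List.singleton_append, List.getD_eq_getElem?_getD]
        simp only [List.getElem?_cons_succ, List.getElem?_append, List.length_cons,
          List.length_map]
        rw [if_pos (show ii + 1 < grid.length + 1 from by omega), ← List.getD_eq_getElem?_getD,
          hr? ii j (by omega) hj]
        simp
    have hD : ((([List.replicate (pvM grid) (0:Int)] ++ (grid.map (fun (row : String) =>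
          (row.toList.take (pvM grid)).map (fun c => (PySem.Int.ofChars? [c]).getD 0)))
          ++ [List.replicate (pvM grid) 0]).getD (i + 2) [])[j]?)
        = some (if i + 1 < grid.length then pvVal grid (i + 1) j else 0) := by
      rw [List.singleton_append, List.getD_eq_getElem?_getD,
        show i + 2 = (i + 1) + 1 from by omega]
      by_cases hiN : i + 1 < grid.length
      · simp only [List.getElem?_cons_succ, List.getElem?_append, List.length_cons,
          List.length_map]
        rw [if_pos (by omega), ← List.getD_eq_getElem?_getD, hr? (i + 1) j hiN hj, if_pos hiN]
      · simp only [List.getElem?_cons_succ, List.getElem?_append, List.length_cons,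
          List.length_map]
        rw [if_neg (by omega), show i + 1 + 1 - (grid.length + 1) = 0 from by omega]
        simp [hj, hiN]
    simp only [List.getElem?_zipWith, hA, hB, hC, hU, hD, List.getElem?_map,
      List.getElem?_range hj, Option.map_some]
    rfl
  · -- j past the row width: both sides are none
    rw [List.getElem?_eq_none, List.getElem?_eq_none]
    · simp only [List.length_map, List.length_range]; omega
    · simp only [List.length_zipWith, hrlen i hi]
      omega

lemma pv_cell_eq (grid : List String) (i j : Nat) (hi : i < grid.length) (hj : j < pvM grid) :
    pvAcell grid i j = pvBcell grid i j := by
  unfold pvAcell pvBcell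
  simp only [List.foldl_cons, List.foldl_nil]
  simp only [
    show (0 ≤ (i:Int) + -1 ∧ (i:Int) + -1 < (grid.length:Int) ∧
        0 ≤ (j:Int) + 0 ∧ (j:Int) + 0 < (pvM grid:Int)) ↔ 1 ≤ i from by omega,
    show (0 ≤ (i:Int) + 1 ∧ (i:Int) + 1 < (grid.length:Int) ∧
        0 ≤ (j:Int) + 0 ∧ (j:Int) + 0 < (pvM grid:Int)) ↔ i + 1 < grid.length from by omega,
    show (0 ≤ (i:Int) + 0 ∧ (i:Int) + 0 < (grid.length:Int) ∧
        0 ≤ (j:Int) + -1 ∧ (j:Int) + -1 < (pvM grid:Int)) ↔ 1 ≤ j from by omega,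
    show (0 ≤ (i:Int) + 0 ∧ (i:Int) + 0 < (grid.length:Int) ∧
        0 ≤ (j:Int) + 1 ∧ (j:Int) + 1 < (pvM grid:Int)) ↔ j + 1 < pvM grid from by omega,
    show ((j = 0) ↔ ¬ 1 ≤ j) from by omega,
    show ((i = 0) ↔ ¬ 1 ≤ i) from by omega]
  rw [pv_cell_int grid (i:Int) (j:Int) (by omega) (by omega)]
  by_cases h1 : 1 ≤ i <;> by_cases h2 : i + 1 < grid.length <;>
    by_cases h3 : 1 ≤ j <;> by_cases h4 : j + 1 < pvM grid <;>
  simp only [h1, h2, h3, h4, not_true, not_false_iff] <;>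
  (try rw [pv_cell_int grid ((i:Int) + -1) ((j:Int) + 0) (by omega) (by omega)]) <;>
  (try rw [pv_cell_int grid ((i:Int) + 1) ((j:Int) + 0) (by omega) (by omega)]) <;>
  (try rw [pv_cell_int grid ((i:Int) + 0) ((j:Int) + -1) (by omega) (by omega)]) <;>
  (try rw [pv_cell_int grid ((i:Int) + 0) ((j:Int) + 1) (by omega) (by omega)]) <;>
  simp only [Int.toNat_natCast,
    show ((i:Int) + -1).toNat = i - 1 from by omega,
    show ((i:Int) + 1).toNat = i + 1 from by omega,
    show ((i:Int) + 0).toNat = i from by omega,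
    show ((j:Int) + -1).toNat = j - 1 from by omega,
    show ((j:Int) + 1).toNat = j + 1 from by omega,
    show ((j:Int) + 0).toNat = j from by omega] <;>
  simp [pv_zero_bxor, PySem.Int.bxor_zero, PySem.Int.bxor_comm, pv_bxor_left_comm]

-- ===== VERDICT (by name: the statement is the Claim_ definition above) =====
theorem compute_parity_py_spec : Claim_equal_compute_parity_py := by
  intro grid _ hpre
  unfold Spec_compute_parity_py
  rw [pv_A_norm, pv_B_norm grid hpre]
  apply List.map_congr_left
  intro i hi
  apply List.map_congr_left
  intro j hj
  exact pv_cell_eq grid i j (List.mem_range.mp hi) (List.mem_range.mp hj)
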